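-- pv_equiv track=rewrite | github.com/neko-niko/leetcode | offer/有n个数，两两组成二元组，相差最小的有多少对呢？相差最大呢？.py | Sulotion
-- ===== SOURCE A (Python) =====
-- def Sulotion(lst: list):
--     max_cot = 0
--     min_cot = 0
--     max = -1
--     min = 1e9
--     lst_len = len(lst)
--     i = 0
--     while i < lst_len:
--         j = i + 1
--         while j < lst_len:
--             sub = abs(lst[i] - lst[j])
--             if sub == min:
--                 min_cot += 1
--             elif sub < min:
--                 min_cot = 1
--                 min = sub
--             else:
--                 pass
--
--             if sub == max:
--                 max_cot += 1
--             elif sub > max: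
--                 max_cot = 1
--                 max = sub
--             else:
--                 pass
--             j += 1
--         i += 1
--     return (min_cot, max_cot)
-- ===== SOURCE B (Python) =====
-- def Sulotion(lst: list):
--     n = len(lst)
--     if n < 2:
--         return (0, 0)
--     s = sorted(lst)
--     cnt = {}
--     for x in s:
--         cnt[x] = cnt.get(x, 0) + 1
--     lo, hi = s[0], s[n - 1]
--     if lo == hi:
--         max_cot = n * (n - 1) // 2
--     else:
--         max_cot = cnt[lo] * cnt[hi]
--     g = min(s[i + 1] - s[i] for i in range(n - 1))
--     if g == 0:
--         min_cot = (sum(cnt[x] for x in s) - n) // 2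
--     else:
--         min_cot = sum(cnt.get(x + g, 0) for x in s)
--     return (min_cot, max_cot)
-- ===== Notes on version B (the rewrite author's own statement) =====
-- stated objective: faster
-- what changed: A's O(n^2) nested pair scan with four running accumulators is replaced by sort + a value-count dict: max pairs come from cnt[lo]*cnt[hi] (or n*(n-1)//2 when all values are equal), the minimum difference is the smallest adjacent gap of the sorted list, and its pair count is computed from per-value counts in one O(n) pass.
-- intended difference: On lists of two or more integers whose pairwise absolute differences all exceed 10^9, A's float sentinel min=1e9 is never beaten, so A reports a minimum-difference pair count of zero, while B reports the true positive count of minimum-difference pairs, which is the intended value. — e.g. on Sulotion([-2000000000, 2000000000]): A returns (0, 1), B returns (1, 1)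
import Mathlib
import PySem

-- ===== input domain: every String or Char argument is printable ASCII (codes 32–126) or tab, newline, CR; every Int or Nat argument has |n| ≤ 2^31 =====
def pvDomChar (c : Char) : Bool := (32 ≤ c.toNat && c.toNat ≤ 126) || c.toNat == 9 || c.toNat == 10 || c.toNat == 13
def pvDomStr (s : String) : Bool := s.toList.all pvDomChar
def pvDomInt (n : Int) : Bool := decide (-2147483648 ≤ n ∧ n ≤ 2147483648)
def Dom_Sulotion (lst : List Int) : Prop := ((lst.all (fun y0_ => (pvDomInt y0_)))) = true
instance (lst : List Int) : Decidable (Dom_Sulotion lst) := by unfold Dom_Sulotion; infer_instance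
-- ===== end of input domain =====

-- B replaces A's O(n^2) pair scan by sort + a counting dict (O(n log n)); A's float sentinel
-- `min = 1e9` is ported as the integer 10^9, exact here because every compared value is an integer below 2^53.

-- ===== PORT A =====
def Sulotion (lst : List Int) : Int × Int :=
  let lstLen : Int := lst.length
  let st := (PySem.List.pyRange 0 lstLen 1).foldl (fun st i =>
    (PySem.List.pyRange (i + 1) lstLen 1).foldl (fun st j =>
      let sub := |PySem.List.pyGetD lst i 0 - PySem.List.pyGetD lst j 0|
      let st1 : Int × Int × Int × Int :=
        if sub = st.2.1 then (st.1 + 1, st.2.1, st.2.2)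
        else if sub < st.2.1 then (1, sub, st.2.2) else st
      if sub = st1.2.2.2 then (st1.1, st1.2.1, st1.2.2.1 + 1, st1.2.2.2)
      else if st1.2.2.2 < sub then (st1.1, st1.2.1, 1, sub) else st1) st)
    ((0 : Int), (1000000000 : Int), (0 : Int), (-1 : Int))
  (st.1, st.2.2.1)

-- ===== PORT B =====
def Sulotion_alt (lst : List Int) : Int × Int :=
  let n : Int := lst.length
  if n < 2 then (0, 0)
  else
    let s := PySem.List.sorted lst (fun x => x) false
    let cnt := s.foldl (fun d x => PySem.Dict.insert d x (PySem.Dict.getD d x 0 + 1)) PySem.Dict.empty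
    let lo := PySem.List.pyGetD s 0 0
    let hi := PySem.List.pyGetD s (n - 1) 0
    let maxCot := if lo = hi then PySem.Int.floordiv (n * (n - 1)) 2
                  else ((PySem.Dict.get? cnt lo).getD 0) * ((PySem.Dict.get? cnt hi).getD 0)
    let g := (PySem.List.min? ((PySem.List.pyRange 0 (n - 1) 1).map
              (fun i => PySem.List.pyGetD s (i + 1) 0 - PySem.List.pyGetD s i 0)) (fun x => x)).getD 0
    let minCot := if g = 0 then
                    PySem.Int.floordiv ((s.map (fun x => (PySem.Dict.get? cnt x).getD 0)).sum - n) 2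
                  else (s.map (fun x => PySem.Dict.getD cnt (x + g) 0)).sum
    (minCot, maxCot)

-- ===== PRECONDITION & SPEC =====
-- On lists of ≥ 2 integers whose pairwise absolute differences all exceed 10^9, A's float sentinel
-- `min = 1e9` is never beaten, so A returns min-count 0, while B returns the true (positive) count of
-- minimum-difference pairs, which is the intended value.
def D_Sulotion (lst : List Int) : Prop :=
  2 ≤ lst.length ∧ ∀ i j : Fin lst.length, i < j → 1000000000 < |lst[i] - lst[j]|
instance (lst : List Int) : Decidable (D_Sulotion lst) := by unfold D_Sulotion; infer_instance

def Spec_Sulotion (lst : List Int) (out : Int × Int) : Prop := ¬ D_Sulotion lst → out = Sulotion_alt lst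
instance (lst : List Int) (out : Int × Int) : Decidable (Spec_Sulotion lst out) := by
  unfold Spec_Sulotion; infer_instance

def pvDiffWitness_Sulotion : List Int := [-2000000000, 2000000000]
def pvDiffWitnessOut_Sulotion : (Int × Int) × (Int × Int) := ((0, 1), (1, 1))

-- ===== CLAIM (what is proved, stated in full; the proofs are below) =====
def Claim_unchanged_Sulotion : Prop := ∀ (lst : List Int), Dom_Sulotion lst → Spec_Sulotion lst (Sulotion lst)
def Claim_changed_Sulotion : Prop := Dom_Sulotion (pvDiffWitness_Sulotion) ∧ D_Sulotion (pvDiffWitness_Sulotion) ∧ Sulotion (pvDiffWitness_Sulotion) = pvDiffWitnessOut_Sulotion.1 ∧ Sulotion_alt (pvDiffWitness_Sulotion) = pvDiffWitnessOut_Sulotion.2 ∧ pvDiffWitnessOut_Sulotion.1 ≠ pvDiffWitnessOut_Sulotion.2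
def Claim_exact_Sulotion : Prop := ∀ (lst : List Int), Dom_Sulotion lst → D_Sulotion lst → Sulotion lst ≠ Sulotion_alt lst

-- ===== LEMMAS AND PROOFS =====

-- the multiset of pairwise absolute differences, in A's traversal order
def pvDiffs : List Int → List Int
  | [] => []
  | x :: t => t.map (fun y => |x - y|) ++ pvDiffs t

-- adjacent gaps of a list
def pvGaps : List Int → List Int
  | x :: y :: t => (y - x) :: pvGaps (y :: t)
  | _ => []

-- A's loop as an index list
def pvDsIdx (lst : List Int) : List Int :=
  (PySem.List.pyRange 0 lst.length 1).flatMap (fun i =>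
    (PySem.List.pyRange (i + 1) lst.length 1).map
      (fun j => |PySem.List.pyGetD lst i 0 - PySem.List.pyGetD lst j 0|))

-- A's two independent accumulators
def pvStepMin (st : Int × Int) (d : Int) : Int × Int :=
  if d = st.2 then (st.1 + 1, st.2) else if d < st.2 then (1, d) else st
def pvStepMax (st : Int × Int) (d : Int) : Int × Int :=
  if d = st.2 then (st.1 + 1, st.2) else if st.2 < d then (1, d) else st

def pvStep4 (st : Int × Int × Int × Int) (sub : Int) : Int × Int × Int × Int :=
  let st1 : Int × Int × Int × Int :=
    if sub = st.2.1 then (st.1 + 1, st.2.1, st.2.2)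
    else if sub < st.2.1 then (1, sub, st.2.2) else st
  if sub = st1.2.2.2 then (st1.1, st1.2.1, st1.2.2.1 + 1, st1.2.2.2)
  else if st1.2.2.2 < sub then (st1.1, st1.2.1, 1, sub) else st1

theorem pv_pyGetD_cons_succ (x : Int) (t : List Int) (i : Int) (hi : 0 ≤ i) :
    PySem.List.pyGetD (x :: t) (i + 1) 0 = PySem.List.pyGetD t i 0 := by
  obtain ⟨k, rfl⟩ := Int.eq_ofNat_of_zero_le hi
  have h1 : ((k : Int) + 1) = ((k + 1 : Nat) : Int) := by push_cast; ring
  rw [h1, PySem.List.pyGetD_natCast, PySem.List.pyGetD_natCast]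
  rfl

theorem pvDsIdx_eq (lst : List Int) : pvDsIdx lst = pvDiffs lst := by
  induction lst with
  | nil => simp [pvDsIdx, pvDiffs, PySem.List.pyRange_one_eq_nil]
  | cons x t ih =>
    unfold pvDsIdx pvDiffs
    have hn : ((x :: t).length : Int) = (t.length : Int) + 1 := by
      push_cast [List.length_cons]; ring
    rw [hn, PySem.List.pyRange_one_cons (by omega)]
    simp only [List.flatMap_cons]
    congr 1
    · -- first row
      have h0 : (0 : Int) + 1 = 1 := by ring
      rw [h0, ← hn]
      have hx : PySem.List.pyGetD (x :: t) 0 0 = x := PySem.List.pyGetD_zero_cons x t 0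
      rw [hx]
      have hcomp : ((PySem.List.pyRange 1 ((x :: t).length : Int) 1).map
            (fun j => PySem.List.pyGetD (x :: t) j 0)).map (fun y => |x - y|)
          = (PySem.List.pyRange 1 ((x :: t).length : Int) 1).map
            (fun j => |x - PySem.List.pyGetD (x :: t) j 0|) := by
        rw [List.map_map]; rfl
      rw [← hcomp, PySem.List.map_pyGetD_pyRange' (x :: t) 0 (by omega : (0:Int) ≤ 1)]
      rfl
    · -- remaining rows
      rw [← ih]
      unfold pvDsIdx
      simp only [PySem.List.pyRange_one, List.map_map, List.flatMap_map]
      norm_num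
      congr 1
      funext k
      have e0 : ((t.length : Int) - (1 + (k : Int))).toNat = ((t.length : Int) - ((k : Int) + 1)).toNat := by omega
      rw [e0]
      congr 1
      funext j
      simp only [Function.comp]
      have g1 : PySem.List.pyGetD (x :: t) (1 + (k : Int)) 0 = t[k]?.getD 0 := by
        have e : (1 + (k : Int)) = (k : Int) + 1 := by ring
        rw [e, pv_pyGetD_cons_succ x t _ (by omega), PySem.List.pyGetD_natCast]
        rfl
      have g2 : PySem.List.pyGetD (x :: t) (1 + (k : Int) + 1 + (j : Int)) 0
          = PySem.List.pyGetD t ((k : Int) + 1 + (j : Int)) 0 := by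
        have e : (1 + (k : Int) + 1 + (j : Int)) = ((k : Int) + 1 + (j : Int)) + 1 := by ring
        rw [e, pv_pyGetD_cons_succ x t _ (by omega)]
      rw [g1, g2]

theorem pv_step4_eq (st : Int × Int × Int × Int) (d : Int) :
    pvStep4 st d = ((pvStepMin (st.1, st.2.1) d).1, (pvStepMin (st.1, st.2.1) d).2,
                    (pvStepMax (st.2.2.1, st.2.2.2) d).1, (pvStepMax (st.2.2.1, st.2.2.2) d).2) := by
  obtain ⟨c1, m1, c2, m2⟩ := st
  simp only [pvStep4, pvStepMin, pvStepMax]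
  split_ifs <;> rfl

theorem pv_split (ds : List Int) (c1 m1 c2 m2 : Int) :
    ds.foldl pvStep4 (c1, m1, c2, m2)
      = ((ds.foldl pvStepMin (c1, m1)).1, (ds.foldl pvStepMin (c1, m1)).2,
         (ds.foldl pvStepMax (c2, m2)).1, (ds.foldl pvStepMax (c2, m2)).2) := by
  induction ds generalizing c1 m1 c2 m2 with
  | nil => rfl
  | cons d t ih =>
    simp only [List.foldl_cons]
    rw [pv_step4_eq]
    rw [ih]

theorem pv_A_eq_folds (lst : List Int) :
    Sulotion lst = (((pvDiffs lst).foldl pvStepMin (0, 1000000000)).1,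
                    ((pvDiffs lst).foldl pvStepMax (0, -1)).1) := by
  have h1 : Sulotion lst =
      (let st := (pvDsIdx lst).foldl pvStep4 ((0:Int), (1000000000:Int), (0:Int), (-1:Int));
       (st.1, st.2.2.1)) := by
    unfold Sulotion pvDsIdx
    simp only [List.foldl_flatMap, List.foldl_map]
    rfl
  rw [h1, pvDsIdx_eq]
  rw [pv_split]

theorem pv_diffs_perm {l l' : List Int} (h : l.Perm l') : (pvDiffs l).Perm (pvDiffs l') := by
  induction h with
  | nil => exact List.Perm.refl _
  | cons x h ih =>
    simp only [pvDiffs]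
    exact ((h.map _).append ih)
  | swap x y l =>
    simp only [pvDiffs]
    simp only [List.map_cons, List.cons_append]
    rw [abs_sub_comm y x]
    refine List.Perm.cons _ ?_
    rw [← List.append_assoc, ← List.append_assoc]
    exact (List.perm_append_comm).append_right _
  | trans h1 h2 ih1 ih2 => exact ih1.trans ih2

theorem pv_diffs_nonneg {l : List Int} {d : Int} (hd : d ∈ pvDiffs l) : 0 ≤ d := by
  induction l with
  | nil => simp [pvDiffs] at hd
  | cons x t ih =>
    simp only [pvDiffs, List.mem_append, List.mem_map] at hd
    rcases hd with ⟨y, _, rfl⟩ | hd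
    · exact abs_nonneg _
    · exact ih hd

theorem pv_length_diffs (l : List Int) :
    2 * ((pvDiffs l).length : Int) = (l.length : Int) * ((l.length : Int) - 1) := by
  induction l with
  | nil => rfl
  | cons x t ih =>
    simp only [pvDiffs, List.length_append, List.length_map, List.length_cons]
    push_cast
    push_cast at ih
    linear_combination ih

theorem pv_mem_diffs_iff {l : List Int} {d : Int} :
    d ∈ pvDiffs l ↔ ∃ i j : Nat, i < j ∧ j < l.length ∧ d = |l.getD i 0 - l.getD j 0| := by
  induction l with
  | nil => simp [pvDiffs]
  | cons x t ih =>
    simp only [pvDiffs, List.mem_append, List.mem_map, ih]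
    constructor
    · rintro (⟨y, hy, rfl⟩ | ⟨i, j, hij, hj, rfl⟩)
      · obtain ⟨k, hk, rfl⟩ := List.getElem_of_mem hy
        refine ⟨0, k + 1, by omega, by simp; omega, ?_⟩
        simp [List.getD_cons_succ, List.getD]
        rw [List.getElem?_eq_getElem hk]
        rfl
      · exact ⟨i + 1, j + 1, by omega, by simp; omega, by simp [List.getD_cons_succ]⟩
    · rintro ⟨i, j, hij, hj, rfl⟩
      cases i with
      | zero =>
        left
        refine ⟨t.getD (j - 1) 0, ?_, ?_⟩
        · have hj1 : j - 1 < t.length := by simp at hj; omega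
          rw [List.getD_eq_getElem _ _ hj1]
          exact List.getElem_mem _
        · obtain ⟨j', rfl⟩ : ∃ j', j = j' + 1 := ⟨j - 1, by omega⟩
          simp [List.getD_cons_succ]
      | succ i' =>
        right
        obtain ⟨j', rfl⟩ : ∃ j', j = j' + 1 := ⟨j - 1, by omega⟩
        exact ⟨i', j', by omega, by simp at hj; omega, by simp [List.getD_cons_succ]⟩

theorem pv_sum_ite (l : List Int) (v c : Int) :
    (l.map (fun x => if x = v then c else 0)).sum = (l.count v : Int) * c := by
  induction l with
  | nil => simp
  | cons x t ih =>
    simp only [List.map_cons, List.sum_cons, ih, List.count_cons]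
    by_cases h : x = v
    · subst h; simp; push_cast; ring
    · simp [h]

-- pairwise-equal pair count: for every list (no sortedness needed)
theorem pv_count0 (l : List Int) :
    2 * ((pvDiffs l).count 0 : Int) + (l.length : Int)
      = (l.map (fun x => (l.count x : Int))).sum := by
  induction l with
  | nil => simp [pvDiffs]
  | cons x t ih =>
    have hmap : ((t.map (fun y => |x - y|)).count 0 : Int) = (t.count x : Int) := by
      rw [List.count_eq_countP, List.countP_map]
      rw [List.count_eq_countP]
      congr 1
      apply List.countP_congr
      intro y _
      simp only [Function.comp_apply, beq_iff_eq, abs_eq_zero, sub_eq_zero]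
      constructor
      · intro h; omega
      · intro h; omega
    simp only [pvDiffs, List.count_append, List.map_cons, List.sum_cons]
    have hcnt : ∀ y : Int, (((x :: t).count y : Int)) = (t.count y : Int) + (if y = x then 1 else 0) := by
      intro y
      by_cases h : y = x
      · subst h; rw [List.count_cons_self]; simp
      · rw [List.count_cons_of_ne (fun e => h e.symm), if_neg h]; simp
    have hmapc : (t.map (fun y => (((x :: t).count y : Nat) : Int))).sum
        = (t.map (fun y => (t.count y : Int))).sum + (t.count x : Int) := by
      calc (t.map (fun y => (((x :: t).count y : Nat) : Int))).sum
          = (t.map (fun y => (t.count y : Int) + (if y = x then 1 else 0))).sum :=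
            congrArg _ (List.map_congr_left (fun y _ => hcnt y))
        _ = (t.map (fun y => (t.count y : Int))).sum
            + (t.map (fun y => if y = x then (1 : Int) else 0)).sum :=
            PySem.List.sum_map_add_int t _ _
        _ = (t.map (fun y => (t.count y : Int))).sum + (t.count x : Int) := by
            rw [pv_sum_ite]; ring
    rw [hmapc, hcnt x, if_pos rfl]
    simp only [List.length_cons]
    push_cast [hmap]
    push_cast at ih
    linarith [ih]

theorem pvDiffs_cons (x : Int) (t : List Int) :
    pvDiffs (x :: t) = t.map (fun y => |x - y|) ++ pvDiffs t := rfl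

theorem pvGaps_cons2 (x y : Int) (t : List Int) :
    pvGaps (x :: y :: t) = (y - x) :: pvGaps (y :: t) := rfl

theorem pv_count_gt (l : List Int) (hs : l.Pairwise (· ≤ ·)) (g : Int) (hg : 0 < g) :
    ((pvDiffs l).count g : Int) = (l.map (fun x => (l.count (x + g) : Int))).sum := by
  induction l with
  | nil => simp [pvDiffs]
  | cons x t ih =>
    have hx : ∀ y ∈ t, x ≤ y := fun y hy => List.rel_of_pairwise_cons hs hy
    have hst : t.Pairwise (· ≤ ·) := hs.of_cons
    have hmap : ((t.map (fun y => |x - y|)).count g : Int) = (t.count (x + g) : Int) := by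
      rw [List.count_eq_countP, List.countP_map, List.count_eq_countP]
      congr 1
      apply List.countP_congr
      intro y hy
      have hxy := hx y hy
      have habs : |x - y| = y - x := by rw [abs_sub_comm]; exact abs_of_nonneg (by omega)
      simp only [Function.comp_apply, beq_iff_eq, habs]
      constructor
      · intro h; omega
      · intro h; omega
    simp only [pvDiffs, List.count_append, List.map_cons, List.sum_cons]
    have hcx : ((x :: t).count (x + g) : Int) = (t.count (x + g) : Int) := by
      rw [List.count_cons_of_ne (by omega : x ≠ x + g)]
    have hmapc : (t.map (fun y => (((x :: t).count (y + g) : Nat) : Int))).sum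
        = (t.map (fun y => (t.count (y + g) : Int))).sum := by
      apply congrArg
      apply List.map_congr_left
      intro y hy
      have := hx y hy
      rw [List.count_cons_of_ne (by omega : x ≠ y + g)]
    rw [hmapc, hcx]
    push_cast
    rw [hmap, ih hst]

theorem pv_gaps_sub {l : List Int} (hs : l.Pairwise (· ≤ ·)) {gp : Int} (h : gp ∈ pvGaps l) :
    gp ∈ pvDiffs l := by
  induction l with
  | nil => simp [pvGaps] at h
  | cons x t ih =>
    match t, h with
    | y :: t', h =>
      have hx : ∀ z ∈ y :: t', x ≤ z := fun z hz => List.rel_of_pairwise_cons hs hz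
      rw [pvGaps_cons2, List.mem_cons] at h
      rw [pvDiffs_cons, List.mem_append]
      rcases h with rfl | h
      · left
        rw [List.mem_map]
        refine ⟨y, List.mem_cons_self, ?_⟩
        have := hx y List.mem_cons_self
        rw [abs_sub_comm]; exact abs_of_nonneg (by omega)
      · right
        exact ih hs.of_cons h

theorem pv_gaps_lb {l : List Int} (hs : l.Pairwise (· ≤ ·)) {d : Int} (hd : d ∈ pvDiffs l) :
    ∃ gp ∈ pvGaps l, gp ≤ d := by
  induction l with
  | nil => simp [pvDiffs] at hd
  | cons x t ih =>
    rw [pvDiffs_cons, List.mem_append] at hd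
    have hx : ∀ z ∈ t, x ≤ z := fun z hz => List.rel_of_pairwise_cons hs hz
    rcases hd with hd | hd
    · rw [List.mem_map] at hd
      obtain ⟨y, hy, rfl⟩ := hd
      match t, hy, hx with
      | z :: t', hy, hx =>
        refine ⟨z - x, by rw [pvGaps_cons2]; exact List.mem_cons_self, ?_⟩
        have hxz := hx z List.mem_cons_self
        have hxy := hx y hy
        have hzy : z ≤ y := by
          rcases List.mem_cons.mp hy with h' | h'
          · omega
          · exact List.rel_of_pairwise_cons hs.of_cons h'
        have : |x - y| = y - x := by rw [abs_sub_comm]; exact abs_of_nonneg (by omega)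
        omega
    · obtain ⟨gp, hgp, hle⟩ := ih hs.of_cons hd
      match t, hgp with
      | z :: t', hgp =>
        refine ⟨gp, ?_, hle⟩
        rw [pvGaps_cons2, List.mem_cons]
        exact Or.inr hgp

theorem pvGapsIdx_eq (s : List Int) :
    (PySem.List.pyRange 0 ((s.length : Int) - 1) 1).map
      (fun i => PySem.List.pyGetD s (i + 1) 0 - PySem.List.pyGetD s i 0) = pvGaps s := by
  match s with
  | [] => rw [PySem.List.pyRange_one_eq_nil (by simp)]; rfl
  | [x] => rw [PySem.List.pyRange_one_eq_nil (by simp)]; rfl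
  | x :: y :: t =>
    have hlen : ((x :: y :: t).length : Int) - 1 = ((y :: t).length : Int) := by
      simp [List.length_cons]
    rw [hlen, PySem.List.pyRange_one_cons (by simp), List.map_cons, pvGaps_cons2]
    congr 1
    · have e1 : PySem.List.pyGetD (x :: y :: t) (0 + 1) 0 = y := by
        rw [pv_pyGetD_cons_succ x (y :: t) 0 le_rfl, PySem.List.pyGetD_zero_cons]
      rw [e1, PySem.List.pyGetD_zero_cons]
    · rw [← pvGapsIdx_eq (y :: t)]
      have h01 : (0 : Int) + 1 = 1 := by ring
      rw [h01, PySem.List.pyRange_one 1, PySem.List.pyRange_one 0]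
      have hN : (((y :: t).length : Int) - 1).toNat = (((y :: t).length : Int) - 1 - 0).toNat := by omega
      rw [← hN]
      rw [List.map_map, List.map_map]
      congr 1
      funext k
      simp only [Function.comp]
      have g1 : PySem.List.pyGetD (x :: y :: t) (1 + (k : Int) + 1) 0
          = PySem.List.pyGetD (y :: t) (0 + (k : Int) + 1) 0 := by
        have e : (1 + (k : Int) + 1) = ((0 + (k : Int) + 1)) + 1 := by ring
        rw [e, pv_pyGetD_cons_succ x (y :: t) _ (by omega)]
      have g2 : PySem.List.pyGetD (x :: y :: t) (1 + (k : Int)) 0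
          = PySem.List.pyGetD (y :: t) (0 + (k : Int)) 0 := by
        have e : (1 + (k : Int)) = (0 + (k : Int)) + 1 := by ring
        rw [e, pv_pyGetD_cons_succ x (y :: t) _ (by omega)]
      rw [g1, g2]


theorem pv_runMin (ds : List Int) (c m : Int) :
    ds.foldl pvStepMin (c, m) =
      (if ds.foldl min m = m then c + (ds.count m : Int) else (ds.count (ds.foldl min m) : Int),
       ds.foldl min m) := by
  induction ds generalizing c m with
  | nil => simp
  | cons d t ih =>
    simp only [List.foldl_cons, pvStepMin]
    rcases lt_trichotomy d m with hlt | heq | hgt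
    · rw [if_neg (by omega), if_pos hlt, ih]
      have hmd : min m d = d := by omega
      rw [hmd]
      have hle' := (PySem.List.foldl_min_le t d).1
      rw [if_neg (by omega : ¬ t.foldl min d = m)]
      by_cases h2 : t.foldl min d = d
      · rw [if_pos h2, h2, List.count_cons_self]
        refine Prod.ext ?_ rfl
        push_cast; omega
      · rw [if_neg h2, List.count_cons_of_ne (by omega : d ≠ t.foldl min d)]
    · subst heq
      rw [if_pos rfl, ih, min_self]
      have hle := (PySem.List.foldl_min_le t d).1
      by_cases h2 : t.foldl min d = d
      · rw [if_pos h2, if_pos h2, h2, List.count_cons_self]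
        refine Prod.ext ?_ rfl
        push_cast; omega
      · rw [if_neg h2, if_neg h2, List.count_cons_of_ne (by omega : d ≠ t.foldl min d)]
    · rw [if_neg (by omega), if_neg (by omega), ih]
      have hmd : min m d = m := by omega
      rw [hmd]
      have hle := (PySem.List.foldl_min_le t m).1
      by_cases h2 : t.foldl min m = m
      · rw [if_pos h2, if_pos h2, List.count_cons_of_ne (by omega : d ≠ m)]
      · rw [if_neg h2, if_neg h2, List.count_cons_of_ne (by omega : d ≠ t.foldl min m)]

theorem pv_runMax (ds : List Int) (c m : Int) :
    ds.foldl pvStepMax (c, m) =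
      (if ds.foldl max m = m then c + (ds.count m : Int) else (ds.count (ds.foldl max m) : Int),
       ds.foldl max m) := by
  induction ds generalizing c m with
  | nil => simp
  | cons d t ih =>
    simp only [List.foldl_cons, pvStepMax]
    rcases lt_trichotomy m d with hlt | heq | hgt
    · rw [if_neg (by omega), if_pos hlt, ih]
      have hmd : max m d = d := by omega
      rw [hmd]
      have hle' := (PySem.List.le_foldl_max t d).1
      rw [if_neg (by omega : ¬ t.foldl max d = m)]
      by_cases h2 : t.foldl max d = d
      · rw [if_pos h2, h2, List.count_cons_self]
        refine Prod.ext ?_ rfl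
        push_cast; omega
      · rw [if_neg h2, List.count_cons_of_ne (by omega : d ≠ t.foldl max d)]
    · rw [if_pos heq.symm, ih]
      subst heq
      rw [max_self]
      have hle := (PySem.List.le_foldl_max t m).1
      by_cases h2 : t.foldl max m = m
      · rw [if_pos h2, if_pos h2, h2, List.count_cons_self]
        refine Prod.ext ?_ rfl
        push_cast; omega
      · rw [if_neg h2, if_neg h2, List.count_cons_of_ne (by omega : m ≠ t.foldl max m)]
    · rw [if_neg (by omega), if_neg (by omega), ih]
      have hmd : max m d = m := by omega
      rw [hmd]
      have hle := (PySem.List.le_foldl_max t m).1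
      by_cases h2 : t.foldl max m = m
      · rw [if_pos h2, if_pos h2, List.count_cons_of_ne (by omega : d ≠ m)]
      · rw [if_neg h2, if_neg h2, List.count_cons_of_ne (by omega : d ≠ t.foldl max m)]

theorem pv_A_val (lst : List Int) (G M : Int)
    (hGmem : G ∈ pvDiffs lst) (hGlb : ∀ d ∈ pvDiffs lst, G ≤ d)
    (hMmem : M ∈ pvDiffs lst) (hMub : ∀ d ∈ pvDiffs lst, d ≤ M) :
    Sulotion lst = ((if 1000000000 < G then 0 else ((pvDiffs lst).count G : Int)),
                    ((pvDiffs lst).count M : Int)) := by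
  rw [pv_A_eq_folds, pv_runMin, pv_runMax]
  have hM0 : 0 ≤ M := pv_diffs_nonneg hMmem
  -- max component
  have hMx1 := (PySem.List.le_foldl_max (pvDiffs lst) (-1)).2 M hMmem
  have hMxmem := PySem.List.foldl_max_mem (pvDiffs lst) (-1)
  have hMx : (pvDiffs lst).foldl max (-1) = M := by
    rcases hMxmem with h | h
    · omega
    · have := hMub _ h
      omega
  rw [hMx, if_neg (by omega : ¬ M = -1)]
  -- min component
  have hF1 := (PySem.List.foldl_min_le (pvDiffs lst) 1000000000).1
  have hF2 := (PySem.List.foldl_min_le (pvDiffs lst) 1000000000).2 G hGmem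
  have hFmem := PySem.List.foldl_min_mem (pvDiffs lst) 1000000000
  by_cases hc : 1000000000 < G
  · have hF : (pvDiffs lst).foldl min 1000000000 = 1000000000 := by
      rcases hFmem with h | h
      · exact h
      · have := hGlb _ h
        omega
    rw [hF, if_pos rfl, if_pos hc]
    have hnot : (1000000000 : Int) ∉ pvDiffs lst := by
      intro hmem
      have := hGlb _ hmem
      omega
    rw [List.count_eq_zero.mpr hnot]
    norm_num
  · have hF : (pvDiffs lst).foldl min 1000000000 = G := by
      rcases hFmem with h | h
      · omega
      · have := hGlb _ h
        omega
    rw [hF, if_neg hc]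
    by_cases hG9 : G = (1000000000 : Int)
    · rw [if_pos hG9, hG9]
      norm_num
    · rw [if_neg hG9]

theorem pv_B_val (lst : List Int) (h2 : 2 ≤ lst.length) :
    ∃ G M : Int,
      G ∈ pvDiffs (PySem.List.sorted lst (fun x => x) false)
      ∧ (∀ d ∈ pvDiffs (PySem.List.sorted lst (fun x => x) false), G ≤ d)
      ∧ M ∈ pvDiffs (PySem.List.sorted lst (fun x => x) false)
      ∧ (∀ d ∈ pvDiffs (PySem.List.sorted lst (fun x => x) false), d ≤ M)
      ∧ Sulotion_alt lst =
          (((pvDiffs (PySem.List.sorted lst (fun x => x) false)).count G : Int),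
           ((pvDiffs (PySem.List.sorted lst (fun x => x) false)).count M : Int)) := by
  set s := PySem.List.sorted lst (fun x => x) false with hs_def
  have hperm : s.Perm lst := PySem.List.sorted_perm lst (fun x => x) false
  have hpw : s.Pairwise (· ≤ ·) := PySem.List.sorted_pairwise lst (fun x => x)
  have hlen : s.length = lst.length := hperm.length_eq
  obtain ⟨a, b, t, hS⟩ : ∃ a b t, s = a :: b :: t := by
    match s, hlen with
    | [], hlen => simp at hlen; omega
    | [x], hlen => simp at hlen; omega
    | x :: y :: t, _ => exact ⟨x, y, t, rfl⟩
  have hlen2 : 2 ≤ s.length := by omega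
  -- head and last
  have ha_min : ∀ y ∈ s, a ≤ y := by
    intro y hy
    rw [hS] at hy hpw
    rcases List.mem_cons.mp hy with rfl | hy'
    · exact le_refl y
    · exact List.rel_of_pairwise_cons hpw hy'
  have hidx : s.length - 1 < s.length := by omega
  have hhi_getD : s.getD (s.length - 1) 0 = s[s.length - 1] := List.getD_eq_getElem s 0 hidx
  set hi := s.getD (s.length - 1) 0 with hhi_def
  have hhi_mem : hi ∈ s := by rw [hhi_getD]; exact List.getElem_mem hidx
  have hhi_ub : ∀ y ∈ s, y ≤ hi := by
    intro y hy
    obtain ⟨i, hi', rfl⟩ := List.getElem_of_mem hy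
    rcases Nat.lt_or_ge i (s.length - 1) with h | h
    · rw [hhi_getD]
      exact (List.pairwise_iff_getElem.mp hpw) i (s.length - 1) hi' hidx h
    · have : i = s.length - 1 := by omega
      subst this
      rw [hhi_getD]
  have ha_le_hi : a ≤ hi := ha_min hi hhi_mem
  -- a as getD
  have ha_getD : s.getD 0 0 = a := by rw [hS]; rfl
  -- M facts
  have hMmem : hi - a ∈ pvDiffs s := by
    rw [pv_mem_diffs_iff]
    refine ⟨0, s.length - 1, by omega, by omega, ?_⟩
    rw [ha_getD, ← hhi_def, abs_sub_comm]
    exact (abs_of_nonneg (by omega)).symm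
  have hMub : ∀ d ∈ pvDiffs s, d ≤ hi - a := by
    intro d hd
    obtain ⟨i, j, hij, hj, rfl⟩ := pv_mem_diffs_iff.mp hd
    have hi' : i < s.length := by omega
    have hui : s.getD i 0 ∈ s := by rw [List.getD_eq_getElem s 0 hi']; exact List.getElem_mem hi'
    have huj : s.getD j 0 ∈ s := by rw [List.getD_eq_getElem s 0 hj]; exact List.getElem_mem hj
    have h1 := ha_min _ hui
    have h2 := ha_min _ huj
    have h3 := hhi_ub _ hui
    have h4 := hhi_ub _ huj
    exact abs_sub_le_iff.mpr ⟨by omega, by omega⟩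
  -- the counting dict
  have hcnt : ∀ v : Int,
      PySem.Dict.getD (s.foldl (fun d x => PySem.Dict.insert d x (PySem.Dict.getD d x 0 + 1))
        PySem.Dict.empty) v 0 = (s.count v : Int) := by
    intro v
    rw [PySem.Dict.getD_foldl_insert_add_one]
    simp
  have hget? : ∀ v : Int,
      ((PySem.Dict.get? (s.foldl (fun d x => PySem.Dict.insert d x (PySem.Dict.getD d x 0 + 1))
        PySem.Dict.empty) v).getD 0) = (s.count v : Int) := by
    intro v
    rw [← PySem.Dict.getD_eq_get?_getD]
    exact hcnt v
  -- the gaps list and G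
  have hn1 : ((lst.length : Int) - 1) = ((s.length : Int) - 1) := by omega
  have hgaps : (PySem.List.pyRange 0 ((lst.length : Int) - 1) 1).map
      (fun i => PySem.List.pyGetD s (i + 1) 0 - PySem.List.pyGetD s i 0) = pvGaps s := by
    rw [hn1]; exact pvGapsIdx_eq s
  have hgapsS : pvGaps s = (b - a) :: pvGaps (b :: t) := by rw [hS, pvGaps_cons2]
  set G := (pvGaps (b :: t)).foldl min (b - a) with hG_def
  have hmin? : PySem.List.min? (pvGaps s) (fun x => x) = some G := by
    rw [hgapsS, hG_def]
    exact PySem.List.min?_id_cons _ _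
  have hGgap : G ∈ pvGaps s := by
    rw [hgapsS, List.mem_cons]
    rcases PySem.List.foldl_min_mem (pvGaps (b :: t)) (b - a) with h | h
    · exact Or.inl h
    · exact Or.inr h
  have hGlbgap : ∀ gp ∈ pvGaps s, G ≤ gp := by
    intro gp hgp
    rw [hgapsS, List.mem_cons] at hgp
    rcases hgp with rfl | hgp
    · exact (PySem.List.foldl_min_le (pvGaps (b :: t)) (b - a)).1
    · exact (PySem.List.foldl_min_le (pvGaps (b :: t)) (b - a)).2 gp hgp
  have hGmem : G ∈ pvDiffs s := pv_gaps_sub hpw hGgap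
  have hGlb : ∀ d ∈ pvDiffs s, G ≤ d := by
    intro d hd
    obtain ⟨gp, h1, h2⟩ := pv_gaps_lb hpw hd
    exact le_trans (hGlbgap gp h1) h2
  refine ⟨G, hi - a, hGmem, hGlb, hMmem, hMub, ?_⟩
  -- now evaluate Sulotion_alt
  simp only [Sulotion_alt]
  rw [if_neg (by omega : ¬ ((lst.length : Int) < 2))]
  rw [← hs_def]
  rw [hgaps, hmin?]
  simp only [Option.getD_some]
  rw [PySem.List.pyGetD_zero, ha_getD]
  have hpyhi : PySem.List.pyGetD s ((lst.length : Int) - 1) 0 = hi := by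
    have e : ((lst.length : Int) - 1) = ((s.length - 1 : Nat) : Int) := by push_cast; omega
    rw [e, PySem.List.pyGetD_natCast]
  rw [hpyhi]
  congr 1
  · -- min component
    by_cases hg0 : G = 0
    · rw [if_pos hg0]
      have hsum : (s.map (fun x =>
          (PySem.Dict.get? (s.foldl (fun d x => PySem.Dict.insert d x (PySem.Dict.getD d x 0 + 1))
            PySem.Dict.empty) x).getD 0)).sum = (s.map (fun x => (s.count x : Int))).sum := by
        apply congrArg
        apply List.map_congr_left
        intro x _
        exact hget? x
      rw [hsum, ← pv_count0 s]
      rw [PySem.Int.floordiv_eq_ediv_of_pos (by norm_num)]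
      rw [hg0]
      have : 2 * ((pvDiffs s).count 0 : Int) + (s.length : Int) - (lst.length : Int)
          = 2 * ((pvDiffs s).count 0 : Int) := by omega
      rw [this]
      omega
    · rw [if_neg hg0]
      have hGpos : 0 < G := by
        have := pv_diffs_nonneg hGmem
        omega
      have hsum : (s.map (fun x =>
          PySem.Dict.getD (s.foldl (fun d x => PySem.Dict.insert d x (PySem.Dict.getD d x 0 + 1))
            PySem.Dict.empty) (x + G) 0)).sum = (s.map (fun x => (s.count (x + G) : Int))).sum := by
        apply congrArg
        apply List.map_congr_left
        intro x _
        exact hcnt (x + G)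
      rw [hsum, ← pv_count_gt s hpw G hGpos]
  · -- max component
    by_cases hd : a = hi
    · rw [if_pos hd]
      have hz : hi - a = 0 := by omega
      rw [hz]
      have hall : ∀ d ∈ pvDiffs s, d = 0 := by
        intro d hdm
        have h1 := pv_diffs_nonneg hdm
        have h2 := hMub d hdm
        omega
      have hcount : ((pvDiffs s).count 0 : Int) = ((pvDiffs s).length : Int) := by
        have hc0 : (pvDiffs s).count 0 = (pvDiffs s).length :=
          List.count_eq_length.mpr (fun d hdm => (hall d hdm).symm)
        exact_mod_cast congrArg (fun k : Nat => (k : Int)) hc0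
      rw [hcount]
      have hL := pv_length_diffs s
      rw [PySem.Int.floordiv_eq_ediv_of_pos (by norm_num)]
      have hcast : (lst.length : Int) = (s.length : Int) := by omega
      rw [hcast]
      omega
    · rw [if_neg hd]
      rw [hget? a, hget? hi]
      have hMpos : 0 < hi - a := by omega
      rw [pv_count_gt s hpw (hi - a) hMpos]
      have hmapc : (s.map (fun x => (s.count (x + (hi - a)) : Int))).sum
          = (s.map (fun x => if x = a then (s.count hi : Int) else 0)).sum := by
        apply congrArg
        apply List.map_congr_left
        intro x hx
        by_cases hxa : x = a
        · subst hxa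
          rw [if_pos rfl]
          have e : x + (hi - x) = hi := by ring
          rw [e]
        · rw [if_neg hxa]
          have hax := ha_min x hx
          have hnot : (x + (hi - a)) ∉ s := by
            intro hmem
            have := hhi_ub _ hmem
            omega
          rw [List.count_eq_zero.mpr hnot]
          norm_num
      rw [hmapc, pv_sum_ite]

theorem pv_small (lst : List Int) (h : lst.length < 2) :
    Sulotion lst = (0, 0) ∧ Sulotion_alt lst = (0, 0) := by
  constructor
  · rw [pv_A_eq_folds]
    match lst, h with
    | [], _ => rfl
    | [x], _ => rfl
  · simp only [Sulotion_alt]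
    rw [if_pos (by exact_mod_cast (by omega : (lst.length : Int) < 2))]

theorem pv_fin_pairs (lst : List Int)
    (h : ∀ i j : Fin lst.length, i < j → 1000000000 < |lst[i] - lst[j]|) :
    ∀ d ∈ pvDiffs lst, 1000000000 < d := by
  intro d hd
  obtain ⟨i, j, hij, hj, rfl⟩ := pv_mem_diffs_iff.mp hd
  have hi' : i < lst.length := by omega
  have := h ⟨i, hi'⟩ ⟨j, hj⟩ (by exact hij)
  rwa [List.getD_eq_getElem lst 0 hi', List.getD_eq_getElem lst 0 hj]

-- ===== VERDICT (by name: the statement is the Claim_ definition above) =====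
theorem Sulotion_spec : Claim_unchanged_Sulotion := by
  intro lst _ hnd
  by_cases h2 : 2 ≤ lst.length
  · obtain ⟨G, M, hGmem, hGlb, hMmem, hMub, hB⟩ := pv_B_val lst h2
    have hperm : (pvDiffs (PySem.List.sorted lst (fun x => x) false)).Perm (pvDiffs lst) :=
      pv_diffs_perm (PySem.List.sorted_perm lst (fun x => x) false)
    have hGmem' : G ∈ pvDiffs lst := hperm.mem_iff.mp hGmem
    have hGlb' : ∀ d ∈ pvDiffs lst, G ≤ d := fun d hd => hGlb d (hperm.mem_iff.mpr hd)
    have hMmem' : M ∈ pvDiffs lst := hperm.mem_iff.mp hMmem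
    have hMub' : ∀ d ∈ pvDiffs lst, d ≤ M := fun d hd => hMub d (hperm.mem_iff.mpr hd)
    have hA := pv_A_val lst G M hGmem' hGlb' hMmem' hMub'
    have hG9 : ¬ 1000000000 < G := by
      intro hgt
      apply hnd
      refine ⟨h2, ?_⟩
      intro i j hij
      have hd : |lst[i] - lst[j]| ∈ pvDiffs lst := by
        rw [pv_mem_diffs_iff]
        refine ⟨i, j, hij, j.isLt, ?_⟩
        rw [List.getD_eq_getElem lst 0 i.isLt, List.getD_eq_getElem lst 0 j.isLt]
        rfl
      have := hGlb' _ hd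
      omega
    rw [hA, hB, if_neg hG9, hperm.count_eq, hperm.count_eq]
  · obtain ⟨hA, hB⟩ := pv_small lst (by omega)
    rw [hA, hB]
theorem Sulotion_changed : Claim_changed_Sulotion := by unfold Claim_changed_Sulotion; decide
theorem Sulotion_tight : Claim_exact_Sulotion := by
  intro lst _ hD
  obtain ⟨G, M, hGmem, hGlb, hMmem, hMub, hB⟩ := pv_B_val lst hD.1
  have hperm : (pvDiffs (PySem.List.sorted lst (fun x => x) false)).Perm (pvDiffs lst) :=
    pv_diffs_perm (PySem.List.sorted_perm lst (fun x => x) false)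
  have hGmem' : G ∈ pvDiffs lst := hperm.mem_iff.mp hGmem
  have hGlb' : ∀ d ∈ pvDiffs lst, G ≤ d := fun d hd => hGlb d (hperm.mem_iff.mpr hd)
  have hMmem' : M ∈ pvDiffs lst := hperm.mem_iff.mp hMmem
  have hMub' : ∀ d ∈ pvDiffs lst, d ≤ M := fun d hd => hMub d (hperm.mem_iff.mpr hd)
  have hA := pv_A_val lst G M hGmem' hGlb' hMmem' hMub'
  have hGgt : 1000000000 < G := pv_fin_pairs lst hD.2 G hGmem'
  intro hEq
  rw [hA, hB, if_pos hGgt] at hEq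
  have h1 := congrArg Prod.fst hEq
  simp only at h1
  have hpos : 0 < (pvDiffs (PySem.List.sorted lst (fun x => x) false)).count G :=
    List.count_pos_iff.mpr hGmem
  omega
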